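-- pv_equiv track=rewrite | github.com/BahijSayegh/master_thesis_anomaly_detection_iiot_using_mqtt | feature_extraction/scripts/label_processor.py | determine_anomaly_type
-- ===== SOURCE A (Python) =====
-- ANOMALY_TYPES = {
--     range(1, 6): "inject-bme",
--     range(6, 11): "inject-ldr",
--     range(11, 16): "move-camera",
--     range(16, 21): "stock-how",
--     range(21, 26): "change-state-dsi",
--     range(26, 31): "change-state-dso",
--     range(31, 34): "change-state-mpo-2",
--     range(34, 37): "change-state-mpo-4",
--     range(37, 40): "change-state-hbw-2",
--     range(40, 43): "change-state-hbw-4",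
--     range(43, 46): "change-state-sld-2",
--     range(46, 49): "change-state-sld-4",
--     range(49, 55): "change-state-vgr-2",
--     range(55, 61): "change-state-vgr-4"
-- }
--
-- def determine_anomaly_type(class_type: str, file_id: int) -> str:
--     """
--     Determine specific anomaly type based on file classification and ID ranges.
--
--     Args:
--         class_type (str): Classification of the file ('Normal' or 'Anomalous')
--         file_id (int): Numerical identifier from filename
--
--     Returns:
--         str: Corresponding anomaly type or "No-Anomaly" for normal cases
--     """
--     # If it's a normal case, return immediately
--     if class_type == "Normal":
--         return "No-Anomaly"
--
--     # For anomalous cases, calculate the relative position within the 60-file blocks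
--     base_id = ((file_id - 1) % 60) + 1
--
--     # Find matching range for anomaly type
--     for id_range, anomaly_type in ANOMALY_TYPES.items():
--         if base_id in id_range:
--             return anomaly_type
--
--     return "No-Anomaly"
-- ===== SOURCE B (Python) =====
-- # B: table-driven binary search over sorted bucket boundaries instead of scanning 14 ranges.
-- _BOUNDS = [1, 6, 11, 16, 21, 26, 31, 34, 37, 40, 43, 46, 49, 55, 61]
-- _TYPES = ["inject-bme", "inject-ldr", "move-camera", "stock-how",
--           "change-state-dsi", "change-state-dso",
--           "change-state-mpo-2", "change-state-mpo-4",
--           "change-state-hbw-2", "change-state-hbw-4",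
--           "change-state-sld-2", "change-state-sld-4",
--           "change-state-vgr-2", "change-state-vgr-4"]
--
-- def determine_anomaly_type(class_type: str, file_id: int) -> str:
--     if class_type == "Normal":
--         return "No-Anomaly"
--     base_id = ((file_id - 1) % 60) + 1
--     # bisect_right by hand: find rightmost boundary <= base_id
--     lo, hi = 0, len(_BOUNDS)
--     while lo < hi:
--         mid = (lo + hi) // 2
--         if _BOUNDS[mid] <= base_id:
--             lo = mid + 1
--         else:
--             hi = mid
--     return _TYPES[lo - 1]
-- ===== Notes on version B (the rewrite author's own statement) =====
-- stated objective: alternative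
-- what changed: The linear scan over the 14 range entries is replaced by a hand-written bisect_right binary search over a sorted boundary table with a parallel list of type names.
import Mathlib
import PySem

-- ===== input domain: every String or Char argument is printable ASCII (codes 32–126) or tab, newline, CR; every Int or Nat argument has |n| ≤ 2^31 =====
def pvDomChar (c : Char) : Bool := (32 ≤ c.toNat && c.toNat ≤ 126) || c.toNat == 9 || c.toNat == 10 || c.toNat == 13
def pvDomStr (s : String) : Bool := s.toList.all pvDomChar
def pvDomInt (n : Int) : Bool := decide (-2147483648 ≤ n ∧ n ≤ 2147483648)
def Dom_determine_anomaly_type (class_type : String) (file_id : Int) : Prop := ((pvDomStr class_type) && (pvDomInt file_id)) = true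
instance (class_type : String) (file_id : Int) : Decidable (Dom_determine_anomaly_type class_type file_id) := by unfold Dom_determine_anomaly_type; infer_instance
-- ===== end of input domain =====

-- B replaces the linear scan over 14 ranges by a hand-written binary search over sorted
-- bucket start-boundaries with a parallel list of type names (objective: alternative).

-- ===== PORT A =====
-- ANOMALY_TYPES as an association list of (range lo, range hi) → name, in insertion order.
def pvAnomalyTypes : List ((Int × Int) × String) :=
  [((1, 6), "inject-bme"), ((6, 11), "inject-ldr"), ((11, 16), "move-camera"),
   ((16, 21), "stock-how"), ((21, 26), "change-state-dsi"), ((26, 31), "change-state-dso"),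
   ((31, 34), "change-state-mpo-2"), ((34, 37), "change-state-mpo-4"),
   ((37, 40), "change-state-hbw-2"), ((40, 43), "change-state-hbw-4"),
   ((43, 46), "change-state-sld-2"), ((46, 49), "change-state-sld-4"),
   ((49, 55), "change-state-vgr-2"), ((55, 61), "change-state-vgr-4")]

-- the for-loop over ANOMALY_TYPES.items(): first range containing base_id wins
def pvScanA : List ((Int × Int) × String) → Int → String
  | [], _ => "No-Anomaly"
  | ((a, b), t) :: rest, x => if a ≤ x ∧ x < b then t else pvScanA rest x

def determine_anomaly_type (class_type : String) (file_id : Int) : String :=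
  if class_type = "Normal" then "No-Anomaly"
  else
    let base_id := PySem.Int.mod (file_id - 1) 60 + 1
    pvScanA pvAnomalyTypes base_id

-- ===== PORT B =====
def pvBounds : List Int := [1, 6, 11, 16, 21, 26, 31, 34, 37, 40, 43, 46, 49, 55, 61]
def pvTypes : List String :=
  ["inject-bme", "inject-ldr", "move-camera", "stock-how",
   "change-state-dsi", "change-state-dso", "change-state-mpo-2", "change-state-mpo-4",
   "change-state-hbw-2", "change-state-hbw-4", "change-state-sld-2", "change-state-sld-4",
   "change-state-vgr-2", "change-state-vgr-4"]

-- the while-loop of Source B: bisect_right by hand; indices mid are always < pvBounds.length,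
-- so getD is exact here
-- fuel-bounded structural recursion (each step shrinks hi - lo, so fuel = pvBounds.length
-- always suffices; the loop itself is exactly Source B's while loop)
def pvBisect : Nat → Int → Nat → Nat → Nat
  | 0, _, lo, _ => lo
  | fuel + 1, x, lo, hi =>
    if lo < hi then
      let mid := (lo + hi) / 2
      if (pvBounds.getD mid 0) ≤ x then pvBisect fuel x (mid + 1) hi
      else pvBisect fuel x lo mid
    else lo

def determine_anomaly_type_alt (class_type : String) (file_id : Int) : String :=
  if class_type = "Normal" then "No-Anomaly"
  else
    let base_id := PySem.Int.mod (file_id - 1) 60 + 1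
    let lo := pvBisect pvBounds.length base_id 0 pvBounds.length
    -- _TYPES[lo - 1]: pyGet? is exact (incl. Python's negative wrap); never none here
    (PySem.List.pyGet? pvTypes ((lo : Int) - 1)).getD ""

-- ===== PRECONDITION & SPEC =====
def Spec_determine_anomaly_type (class_type : String) (file_id : Int) (out : String) : Prop := out = determine_anomaly_type_alt class_type file_id
instance (class_type : String) (file_id : Int) (out : String) : Decidable (Spec_determine_anomaly_type class_type file_id out) := by unfold Spec_determine_anomaly_type; infer_instance

-- ===== CLAIM (what is proved, stated in full; the proofs are below) =====
def Claim_equal_determine_anomaly_type : Prop := ∀ (class_type : String) (file_id : Int), Dom_determine_anomaly_type class_type file_id → Spec_determine_anomaly_type class_type file_id (determine_anomaly_type class_type file_id)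

-- ===== LEMMAS AND PROOFS =====
-- Both results depend on the input only through the Normal test and base_id ∈ [1, 60].
lemma pv_agree_on_base (b : Int) (h1 : 1 ≤ b) (h2 : b ≤ 60) :
    pvScanA pvAnomalyTypes b =
      (PySem.List.pyGet? pvTypes ((pvBisect pvBounds.length b 0 pvBounds.length : Int) - 1)).getD "" := by
  interval_cases b <;> decide

-- ===== VERDICT (by name: the statement is the Claim_ definition above) =====
theorem determine_anomaly_type_spec : Claim_equal_determine_anomaly_type := by
  intro class_type file_id _
  unfold Spec_determine_anomaly_type determine_anomaly_type determine_anomaly_type_alt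
  by_cases h : class_type = "Normal"
  · simp [h]
  · simp only [h, if_false]
    have hlo := PySem.Int.mod_nonneg (file_id - 1) (b := 60) (by norm_num)
    have hhi := PySem.Int.mod_lt (file_id - 1) (b := 60) (by norm_num)
    exact pv_agree_on_base _ (by omega) (by omega)
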